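-- pv_equiv track=rewrite | github.com/clumens/fosa | check-args.py | type_alias
-- ===== SOURCE A (Python) =====
-- basicTypeMap = {
--     "long long unsigned int":   "unsigned long long int",
-- }
--
-- glibTypeMap = {
--     "GHashTable *":             "struct GHashTable *",
--     "GList *":                  "struct GList *",
--     "gchar *":                  "char *",
--     "guint":                    "unsigned int",
-- }
--
-- miscTypeMap = {
--     "xmlNodePtr":               "struct xmlNode *",
-- }
--
-- pcmkTypeMap = {
--     "cib_t *":                  "struct cib_t *",
--     "crm_exit_t":               "crm_exit_e",
--     "lrmd_list_t *":            "struct lrmd_list_t *",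
--     "op_digest_cache_t *":      "struct op_digest_cache_t *",
--     "pcmk__fence_history":      "enum pcmk__fence_history",
--     "pcmk_pacemakerd_state":    "enum pcmk_pacemakerd_state",
--     "pe__location_t *":         "struct pe__location_t *",
--     "pe_action_t *":            "struct pe_action_t *",
--     "pe_node_t *":              "struct pe_node_t *",
--     "pe_resource_t *":          "struct pe_resource_t *",
--     "pe_ticket_t *":            "struct pe_ticket_t *",
--     "pe_working_set_t *":       "struct pe_working_set_t *",
--     "resource_checks_t *":      "struct resource_checks_t *",
--     "stonith_history_t *":      "struct stonith_history_t *",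
-- }
--
-- def type_alias(t):
--     # FIXME: I'm not sure this is right
--     if t.startswith("char["):
--         return "char *"
--
--     if t.startswith("const char["):
--         return "const char *"
--
--     if t in basicTypeMap:
--         return basicTypeMap[t]
--
--     if t in glibTypeMap:
--         return glibTypeMap[t]
--
--     if t in miscTypeMap:
--         return miscTypeMap[t]
--
--     if t in pcmkTypeMap:
--         return pcmkTypeMap[t]
--
--     if t.startswith("const "):
--         # Strip off "const " from the front of the type and look up if there's
--         # an alias for it in any of the maps.  But then put "const " back on
--         # afterwards so we are comparing the right things in check_arg_types.
--         return "const %s" % type_alias(t.removeprefix("const "))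
--
--     return t
-- ===== SOURCE B (Python) =====
-- basicTypeMap = {
--     "long long unsigned int":   "unsigned long long int",
-- }
--
-- glibTypeMap = {
--     "GHashTable *":             "struct GHashTable *",
--     "GList *":                  "struct GList *",
--     "gchar *":                  "char *",
--     "guint":                    "unsigned int",
-- }
--
-- miscTypeMap = {
--     "xmlNodePtr":               "struct xmlNode *",
-- }
--
-- pcmkTypeMap = {
--     "cib_t *":                  "struct cib_t *",
--     "crm_exit_t":               "crm_exit_e",
--     "lrmd_list_t *":            "struct lrmd_list_t *",
--     "op_digest_cache_t *":      "struct op_digest_cache_t *",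
--     "pcmk__fence_history":      "enum pcmk__fence_history",
--     "pcmk_pacemakerd_state":    "enum pcmk_pacemakerd_state",
--     "pe__location_t *":         "struct pe__location_t *",
--     "pe_action_t *":            "struct pe_action_t *",
--     "pe_node_t *":              "struct pe_node_t *",
--     "pe_resource_t *":          "struct pe_resource_t *",
--     "pe_ticket_t *":            "struct pe_ticket_t *",
--     "pe_working_set_t *":       "struct pe_working_set_t *",
--     "resource_checks_t *":      "struct resource_checks_t *",
--     "stonith_history_t *":      "struct stonith_history_t *",
-- }
--
-- _allTypeMaps = {**basicTypeMap, **glibTypeMap, **miscTypeMap, **pcmkTypeMap}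
--
-- def type_alias(t):
--     prefix = ""
--     while True:
--         if t.startswith("char["):
--             return prefix + "char *"
--         if t.startswith("const char["):
--             return prefix + "const char *"
--         if t in _allTypeMaps:
--             return prefix + _allTypeMaps[t]
--         if t.startswith("const "):
--             prefix += "const "
--             t = t[len("const "):]
--             continue
--         return prefix + t
-- ===== Notes on version B (the rewrite author's own statement) =====
-- stated objective: simpler
-- what changed: Replaces the tail recursion over the stripped const qualifier with an iterative loop that accumulates the peeled qualifier prefix in a string, and merges the four type maps into one dict built once so a single lookup replaces the four chained membership tests.
import Mathlib
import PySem

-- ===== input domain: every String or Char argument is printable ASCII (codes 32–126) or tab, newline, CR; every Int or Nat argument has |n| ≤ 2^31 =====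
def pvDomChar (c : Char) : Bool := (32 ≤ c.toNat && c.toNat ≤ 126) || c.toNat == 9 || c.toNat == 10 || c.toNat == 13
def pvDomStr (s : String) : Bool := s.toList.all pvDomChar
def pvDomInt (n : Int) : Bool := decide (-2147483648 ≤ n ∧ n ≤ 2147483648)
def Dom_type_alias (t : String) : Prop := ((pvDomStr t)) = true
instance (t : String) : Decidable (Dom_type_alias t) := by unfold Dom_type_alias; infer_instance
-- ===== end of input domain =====

-- B replaces A's tail recursion on the stripped "const " prefix by an iterative
-- accumulator loop, and merges the four type maps into one so a single lookup
-- replaces the four chained membership tests (objective: simpler).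

-- ===== PORT A =====

-- first-match lookup in a literal dict (Python `t in m` / `m[t]`)
def pvLookup (m : List (String × String)) (t : String) : Option String :=
  match m with
  | [] => none
  | (k, v) :: rest => if k == t then some v else pvLookup rest t

def basicTypeMap : List (String × String) :=
  [("long long unsigned int", "unsigned long long int")]

def glibTypeMap : List (String × String) :=
  [("GHashTable *", "struct GHashTable *"),
   ("GList *", "struct GList *"),
   ("gchar *", "char *"),
   ("guint", "unsigned int")]

def miscTypeMap : List (String × String) :=
  [("xmlNodePtr", "struct xmlNode *")]

def pcmkTypeMap : List (String × String) :=
  [("cib_t *", "struct cib_t *"),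
   ("crm_exit_t", "crm_exit_e"),
   ("lrmd_list_t *", "struct lrmd_list_t *"),
   ("op_digest_cache_t *", "struct op_digest_cache_t *"),
   ("pcmk__fence_history", "enum pcmk__fence_history"),
   ("pcmk_pacemakerd_state", "enum pcmk_pacemakerd_state"),
   ("pe__location_t *", "struct pe__location_t *"),
   ("pe_action_t *", "struct pe_action_t *"),
   ("pe_node_t *", "struct pe_node_t *"),
   ("pe_resource_t *", "struct pe_resource_t *"),
   ("pe_ticket_t *", "struct pe_ticket_t *"),
   ("pe_working_set_t *", "struct pe_working_set_t *"),
   ("resource_checks_t *", "struct resource_checks_t *"),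
   ("stonith_history_t *", "struct stonith_history_t *")]

-- used by the ports' decreasing_by
theorem pvConstDrop (s : List Char)
    (h : PySem.Chars.startswith s "const ".toList = true) :
    (List.drop 6 s).length < s.length := by
  have hp := (PySem.Chars.startswith_iff s "const ".toList).mp h
  have := hp.length_le
  simp at this ⊢
  omega

-- A's algorithm on the character list (t.removeprefix("const ") = drop 6 after the prefix test)
def typeAliasChars (s : List Char) : List Char :=
  if PySem.Chars.startswith s "char[".toList = true then "char *".toList
  else if PySem.Chars.startswith s "const char[".toList = true then "const char *".toList
  else match pvLookup basicTypeMap (String.ofList s) with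
  | some v => v.toList
  | none => match pvLookup glibTypeMap (String.ofList s) with
    | some v => v.toList
    | none => match pvLookup miscTypeMap (String.ofList s) with
      | some v => v.toList
      | none => match pvLookup pcmkTypeMap (String.ofList s) with
        | some v => v.toList
        | none =>
          if h : PySem.Chars.startswith s "const ".toList = true then
            "const ".toList ++ typeAliasChars (s.drop 6)
          else s
termination_by s.length
decreasing_by exact pvConstDrop s h

def type_alias (t : String) : String := String.ofList (typeAliasChars t.toList)

-- ===== PORT B =====

-- the merged dict `{**basicTypeMap, **glibTypeMap, **miscTypeMap, **pcmkTypeMap}` (all keys distinct)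
def pvAllTypeMaps : List (String × String) :=
  basicTypeMap ++ glibTypeMap ++ miscTypeMap ++ pcmkTypeMap

-- B's loop: `prefix` is the accumulated peeled "const " prefix
def typeAliasAltAux (pre : List Char) (s : List Char) : List Char :=
  if PySem.Chars.startswith s "char[".toList = true then pre ++ "char *".toList
  else if PySem.Chars.startswith s "const char[".toList = true then pre ++ "const char *".toList
  else match pvLookup pvAllTypeMaps (String.ofList s) with
  | some v => pre ++ v.toList
  | none =>
    if h : PySem.Chars.startswith s "const ".toList = true then
      typeAliasAltAux (pre ++ "const ".toList) (s.drop 6)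
    else pre ++ s
termination_by s.length
decreasing_by exact pvConstDrop s h

def type_alias_alt (t : String) : String := String.ofList (typeAliasAltAux [] t.toList)

-- ===== PRECONDITION & SPEC =====
def Spec_type_alias (t : String) (out : String) : Prop := out = type_alias_alt t
instance (t : String) (out : String) : Decidable (Spec_type_alias t out) := by unfold Spec_type_alias; infer_instance

-- ===== CLAIM (what is proved, stated in full; the proofs are below) =====
def Claim_equal_type_alias : Prop := ∀ (t : String), Dom_type_alias t → Spec_type_alias t (type_alias t)

-- ===== LEMMAS AND PROOFS =====

theorem pvLookup_append (m₁ m₂ : List (String × String)) (t : String) :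
    pvLookup (m₁ ++ m₂) t =
      (pvLookup m₁ t).rec (pvLookup m₂ t) (fun v => some v) := by
  induction m₁ with
  | nil => simp [pvLookup]
  | cons kv rest ih =>
    obtain ⟨k, v⟩ := kv
    by_cases h : (k == t) = true <;> simp [pvLookup, h, ih]

theorem typeAliasAltAux_eq (s : List Char) (pre : List Char) :
    typeAliasAltAux pre s = pre ++ typeAliasChars s := by
  induction s using typeAliasChars.induct generalizing pre with
  | case1 s h => rw [typeAliasAltAux, typeAliasChars]; simp_all
  | case2 s h1 h2 => rw [typeAliasAltAux, typeAliasChars]; simp_all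
  | case3 s h1 h2 v hv =>
    rw [typeAliasAltAux, typeAliasChars]; simp_all [pvAllTypeMaps, pvLookup_append]
  | case4 s h1 h2 hb v hv =>
    rw [typeAliasAltAux, typeAliasChars]; simp_all [pvAllTypeMaps, pvLookup_append]
  | case5 s h1 h2 hb hg v hv =>
    rw [typeAliasAltAux, typeAliasChars]; simp_all [pvAllTypeMaps, pvLookup_append]
  | case6 s h1 h2 hb hg hm v hv =>
    rw [typeAliasAltAux, typeAliasChars]; simp_all [pvAllTypeMaps, pvLookup_append]
  | case7 s h1 h2 hb hg hm hp hc ih =>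
    rw [typeAliasAltAux, typeAliasChars]; simp_all [pvAllTypeMaps, pvLookup_append]
  | case8 s h1 h2 hb hg hm hp hc =>
    rw [typeAliasAltAux, typeAliasChars]; simp_all [pvAllTypeMaps, pvLookup_append]

-- ===== VERDICT (by name: the statement is the Claim_ definition above) =====
theorem type_alias_spec : Claim_equal_type_alias := by
  intro t _
  unfold Spec_type_alias type_alias type_alias_alt
  rw [typeAliasAltAux_eq]
  simp
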